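-- pv_equiv track=rewrite | github.com/deepmodeling/reacnetgenerator | getmo.py | getatomroute
-- ===== SOURCE A (Python) =====
-- def getatomroute(item):
--     itemi,parameter=item
--     i,atomeachi,atomtypei=itemi
--     step,atomname,mname,timestep=parameter
--     route=[]
--     routestrarr=[]
--     moleculeroute=[]
--     molecule=-1
--     right=-1
--     for j in range(0,step):
--         if atomeachi[j]>0 and atomeachi[j]!=molecule:
--             routestrarr.append(mname[atomeachi[j]-1] + " ("+ str(atomeachi[j])+" step "+str(timestep[j])+")")
--             left=right
--             molecule=atomeachi[j]
--             right=molecule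
--             if left>=0 and not (left,right) in moleculeroute:
--                 moleculeroute.append((left,right))
--     routestr="Atom "+str(i)+" "+atomname[atomtypei-1]+": "+" -> ".join(routestrarr)
--     return moleculeroute,routestr
-- ===== SOURCE B (Python) =====
-- def getatomroute(item):
--     itemi, parameter = item
--     i, atomeachi, atomtypei = itemi
--     step, atomname, mname, timestep = parameter
--     # pass 1: compress the trajectory into the explicit list of transitions
--     changes = []
--     mol = -1
--     for j in range(step):
--         a = atomeachi[j]
--         if a > 0 and a != mol:
--             changes.append((a, timestep[j]))
--             mol = a
--     # strings straight off the transition list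
--     routestrarr = [mname[a - 1] + " (" + str(a) + " step " + str(t) + ")"
--                    for (a, t) in changes]
--     # pairs of consecutive transitions, first-occurrence dedup via a seen-set
--     seen = set()
--     moleculeroute = []
--     for (prev, _), (cur, _) in zip(changes, changes[1:]):
--         if (prev, cur) not in seen:
--             seen.add((prev, cur))
--             moleculeroute.append((prev, cur))
--     routestr = "Atom " + str(i) + " " + atomname[atomtypei - 1] + ": " + " -> ".join(routestrarr)
--     return moleculeroute, routestr
-- ===== Notes on version B (the rewrite author's own statement) =====
-- stated objective: alternative
-- what changed: A's single loop threading four state variables (strings, pair route, molecule, right) is replaced by one compression pass that materialises the transition list `changes`, from which the route strings are a comprehension and the molecule pairs come from zipping consecutive transitions with an ordered seen-set for first-occurrence dedup.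
import Mathlib
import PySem

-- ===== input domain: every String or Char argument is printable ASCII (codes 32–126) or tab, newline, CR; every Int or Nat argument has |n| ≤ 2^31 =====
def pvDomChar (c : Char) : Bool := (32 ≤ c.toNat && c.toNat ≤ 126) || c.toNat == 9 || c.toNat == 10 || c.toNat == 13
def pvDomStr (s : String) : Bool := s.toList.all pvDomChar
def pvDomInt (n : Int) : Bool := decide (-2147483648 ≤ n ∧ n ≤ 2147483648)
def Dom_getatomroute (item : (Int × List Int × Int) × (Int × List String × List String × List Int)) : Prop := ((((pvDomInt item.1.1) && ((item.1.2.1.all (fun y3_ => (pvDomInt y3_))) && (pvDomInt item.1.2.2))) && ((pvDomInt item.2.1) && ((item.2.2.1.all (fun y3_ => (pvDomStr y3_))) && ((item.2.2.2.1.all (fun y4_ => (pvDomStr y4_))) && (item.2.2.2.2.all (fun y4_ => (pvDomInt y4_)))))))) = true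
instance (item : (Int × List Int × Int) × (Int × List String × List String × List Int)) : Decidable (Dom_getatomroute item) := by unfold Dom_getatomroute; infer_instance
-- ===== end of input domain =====

-- B replaces A's single 4-variable loop by an explicit transition list built in one compression
-- pass, then derives the strings by a comprehension and the pair route from consecutive
-- transitions with an ordered seen-set (objective: alternative decomposition, same cost).

-- ===== PORT A =====
-- loop body of A's for-loop, as a helper (state: routestrarr, moleculeroute, molecule, right)
def aStep (atomeachi timestep : List Int) (mname : List String)
    (s : List String × List (Int × Int) × Int × Int) (j : Int) :
    List String × List (Int × Int) × Int × Int :=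
  let routestrarr := s.1
  let moleculeroute := s.2.1
  let molecule := s.2.2.1
  let right := s.2.2.2
  let a := PySem.List.pyGetD atomeachi j 0
  if a > 0 ∧ a ≠ molecule then
    let routestrarr' := routestrarr ++
      [PySem.List.pyGetD mname (a - 1) "" ++ " (" ++ PySem.Int.toStr a ++ " step " ++
        PySem.Int.toStr (PySem.List.pyGetD timestep j 0) ++ ")"]
    let left := right
    let molecule' := a
    let right' := molecule'
    let moleculeroute' :=
      if left ≥ 0 ∧ ¬ (left, right') ∈ moleculeroute then moleculeroute ++ [(left, right')]
      else moleculeroute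
    (routestrarr', moleculeroute', molecule', right')
  else (routestrarr, moleculeroute, molecule, right)

def getatomroute (item : (Int × List Int × Int) × (Int × List String × List String × List Int)) : (List (Int × Int)) × String :=
  let i := item.1.1
  let atomeachi := item.1.2.1
  let atomtypei := item.1.2.2
  let step := item.2.1
  let atomname := item.2.2.1
  let mname := item.2.2.2.1
  let timestep := item.2.2.2.2
  let st := (PySem.List.pyRange 0 step 1).foldl (aStep atomeachi timestep mname) ([], [], -1, -1)
  let routestr := "Atom " ++ PySem.Int.toStr i ++ " " ++
    PySem.List.pyGetD atomname (atomtypei - 1) "" ++ ": " ++ PySem.Str.join " -> " st.1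
  (st.2.1, routestr)

-- ===== PORT B =====
-- compression pass of B (state: changes, mol)
def bStep (atomeachi timestep : List Int) (s : List (Int × Int) × Int) (j : Int) :
    List (Int × Int) × Int :=
  let a := PySem.List.pyGetD atomeachi j 0
  if a > 0 ∧ a ≠ s.2 then (s.1 ++ [(a, PySem.List.pyGetD timestep j 0)], a) else s

-- pair-dedup pass of B (state: seen, moleculeroute)
def bPairStep (s : PySem.Set (Int × Int) × List (Int × Int)) (pq : (Int × Int) × (Int × Int)) :
    PySem.Set (Int × Int) × List (Int × Int) :=
  let p := (pq.1.1, pq.2.1)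
  if PySem.Set.contains s.1 p then s else (PySem.Set.add s.1 p, s.2 ++ [p])

def getatomroute_alt (item : (Int × List Int × Int) × (Int × List String × List String × List Int)) : (List (Int × Int)) × String :=
  let i := item.1.1
  let atomeachi := item.1.2.1
  let atomtypei := item.1.2.2
  let step := item.2.1
  let atomname := item.2.2.1
  let mname := item.2.2.2.1
  let timestep := item.2.2.2.2
  let cm := (PySem.List.pyRange 0 step 1).foldl (bStep atomeachi timestep) ([], -1)
  let changes := cm.1
  let routestrarr := changes.map (fun c =>
    PySem.List.pyGetD mname (c.1 - 1) "" ++ " (" ++ PySem.Int.toStr c.1 ++ " step " ++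
      PySem.Int.toStr c.2 ++ ")")
  let pr := (changes.zip changes.tail).foldl bPairStep (PySem.Set.empty, [])
  let routestr := "Atom " ++ PySem.Int.toStr i ++ " " ++
    PySem.List.pyGetD atomname (atomtypei - 1) "" ++ ": " ++ PySem.Str.join " -> " routestrarr
  (pr.2, routestr)

-- ===== PRECONDITION & SPEC =====
-- Pre_ excludes the inputs on which A raises IndexError (loop index past atomeachi, a
-- transition's molecule id past mname, atomname[atomtypei-1] out of range). It is slightly
-- narrower than exact on timestep only: it asks timestep to cover all of range(step), while A
-- reads timestep[j] only at transition positions, so an input with a short timestep but no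
-- transition past its end is also excluded although A returns there (B returns the same value).
def Pre_getatomroute (item : (Int × List Int × Int) × (Int × List String × List String × List Int)) : Prop :=
  item.2.1.toNat ≤ item.1.2.1.length ∧
  item.2.1.toNat ≤ item.2.2.2.2.length ∧
  (∀ a ∈ item.1.2.1.take item.2.1.toNat, 0 < a → a ≤ (item.2.2.2.1.length : Int)) ∧
  (PySem.List.pyGet? item.2.2.1 (item.1.2.2 - 1)).isSome
instance (item : (Int × List Int × Int) × (Int × List String × List String × List Int)) : Decidable (Pre_getatomroute item) := by unfold Pre_getatomroute; infer_instance

def pvWitness_getatomroute : ((Int × List Int × Int) × (Int × List String × List String × List Int)) :=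
  ((1, [1, 2], 1), (2, ["H"], ["A", "B"], [10, 20]))

def Spec_getatomroute (item : (Int × List Int × Int) × (Int × List String × List String × List Int)) (out : (List (Int × Int)) × String) : Prop := out = getatomroute_alt item
instance (item : (Int × List Int × Int) × (Int × List String × List String × List Int)) (out : (List (Int × Int)) × String) : Decidable (Spec_getatomroute item out) := by unfold Spec_getatomroute; infer_instance

-- ===== CLAIM (what is proved, stated in full; the proofs are below) =====
def Claim_equal_getatomroute : Prop := ∀ (item : (Int × List Int × Int) × (Int × List String × List String × List Int)), Dom_getatomroute item → Pre_getatomroute item → Spec_getatomroute item (getatomroute item)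

-- ===== LEMMAS AND PROOFS =====

-- the string A and B both build for one transition (a, t)
def fmt (mname : List String) (c : Int × Int) : String :=
  PySem.List.pyGetD mname (c.1 - 1) "" ++ " (" ++ PySem.Int.toStr c.1 ++ " step " ++
    PySem.Int.toStr c.2 ++ ")"

-- specification of the compressed transition list
def chs (ae ts : List Int) : Int → List Int → List (Int × Int)
  | _, [] => []
  | m, j :: js =>
    let a := PySem.List.pyGetD ae j 0
    if a > 0 ∧ a ≠ m then (a, PySem.List.pyGetD ts j 0) :: chs ae ts a js else chs ae ts m js

-- final running molecule after the loop
def lm (ae : List Int) : Int → List Int → Int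
  | m, [] => m
  | m, j :: js =>
    let a := PySem.List.pyGetD ae j 0
    if a > 0 ∧ a ≠ m then lm ae a js else lm ae m js

-- pair sequence A generates from a transition list, starting from molecule m
def pairs : Int → List (Int × Int) → List (Int × Int)
  | _, [] => []
  | m, c :: rest => (if 0 ≤ m then [(m, c.1)] else []) ++ pairs c.1 rest

-- first-occurrence dedup-append (what A's membership test performs)
def dedupInto : List (Int × Int) → List (Int × Int) → List (Int × Int)
  | r, [] => r
  | r, p :: ps => dedupInto (if p ∈ r then r else r ++ [p]) ps

-- B's consecutive-pair extraction
def zpm (l : List (Int × Int)) : List (Int × Int) :=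
  (l.zip l.tail).map (fun pq => (pq.1.1, pq.2.1))

theorem B_loop (ae ts : List Int) :
    ∀ (js : List Int) (ch : List (Int × Int)) (m : Int),
      js.foldl (bStep ae ts) (ch, m) = (ch ++ chs ae ts m js, lm ae m js) := by
  intro js
  induction js with
  | nil => intro ch m; simp [chs, lm]
  | cons j js ih =>
    intro ch m
    by_cases h : PySem.List.pyGetD ae j 0 > 0 ∧ PySem.List.pyGetD ae j 0 ≠ m
    · simp [bStep, chs, lm, h, ih]
    · simp [bStep, chs, lm, h, ih]

theorem A_loop (ae ts : List Int) (mn : List String) :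
    ∀ (js : List Int) (rsa : List String) (mr : List (Int × Int)) (m : Int),
      js.foldl (aStep ae ts mn) (rsa, mr, m, m) =
        (rsa ++ (chs ae ts m js).map (fmt mn),
          dedupInto mr (pairs m (chs ae ts m js)), lm ae m js, lm ae m js) := by
  intro js
  induction js with
  | nil => intro rsa mr m; simp [chs, lm, pairs, dedupInto]
  | cons j js ih =>
    intro rsa mr m
    by_cases h : PySem.List.pyGetD ae j 0 > 0 ∧ PySem.List.pyGetD ae j 0 ≠ m
    · by_cases hm : 0 ≤ m
      · by_cases hmem : (m, PySem.List.pyGetD ae j 0) ∈ mr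
        · simp [aStep, chs, lm, pairs, dedupInto, h, hm, hmem, ih, fmt]
        · simp [aStep, chs, lm, pairs, dedupInto, h, hm, hmem, ih, fmt]
      · simp [aStep, chs, lm, pairs, dedupInto, h, hm, ih, fmt]
    · simp [aStep, chs, lm, h, ih]

theorem chs_pos (ae ts : List Int) :
    ∀ (js : List Int) (m : Int) (p : Int × Int), p ∈ chs ae ts m js → 0 < p.1 := by
  intro js
  induction js with
  | nil => intro m p hp; simp [chs] at hp
  | cons j js ih =>
    intro m p hp
    simp only [chs] at hp
    by_cases h : PySem.List.pyGetD ae j 0 > 0 ∧ PySem.List.pyGetD ae j 0 ≠ m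
    · rw [if_pos h] at hp
      rcases List.mem_cons.1 hp with hp | hp
      · subst hp; exact h.1
      · exact ih _ _ hp
    · rw [if_neg h] at hp
      exact ih _ _ hp

theorem pairs_pos_cons :
    ∀ (r : List (Int × Int)) (b t : Int), 0 < b → (∀ p ∈ r, 0 < p.1) →
      pairs b r = zpm ((b, t) :: r) := by
  intro r
  induction r with
  | nil => intro b t _ _; simp [pairs, zpm]
  | cons c r ih =>
    intro b t hb hall
    have hc : 0 < c.1 := hall c (by simp)
    have hrec : pairs c.1 r = zpm ((c.1, c.2) :: r) :=
      ih c.1 c.2 hc (fun p hp => hall p (by simp [hp]))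
    simp only [pairs, zpm, List.tail_cons, List.zip_cons_cons, List.map_cons] at *
    simp [hb.le, hrec]

theorem pairs_neg (l : List (Int × Int)) (hall : ∀ p ∈ l, 0 < p.1) :
    pairs (-1) l = zpm l := by
  cases l with
  | nil => simp [pairs, zpm]
  | cons c r =>
    have hc : 0 < c.1 := hall c (by simp)
    have := pairs_pos_cons r c.1 c.2 hc (fun p hp => hall p (by simp [hp]))
    simp only [pairs, show ¬ ((0 : Int) ≤ -1) by omega, if_neg, List.nil_append]
    simpa using this

theorem B_pairs :
    ∀ (l : List ((Int × Int) × (Int × Int))) (r : List (Int × Int)),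
      (l.foldl bPairStep (r, r)).2 =
        dedupInto r (l.map (fun pq => (pq.1.1, pq.2.1))) := by
  intro l
  induction l with
  | nil => intro r; simp [dedupInto]
  | cons pq l ih =>
    intro r
    by_cases h : (pq.1.1, pq.2.1) ∈ r
    · have hc : PySem.Set.contains r (pq.1.1, pq.2.1) = true := by
        simp [PySem.Set.contains, h]
      simp [bPairStep, dedupInto, hc, h, ih]
    · have hc : ¬ PySem.Set.contains r (pq.1.1, pq.2.1) = true := by
        simp [PySem.Set.contains, h]
      have hadd : PySem.Set.add r (pq.1.1, pq.2.1) = r ++ [(pq.1.1, pq.2.1)] := by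
        simp [PySem.Set.add, PySem.Set.contains, h]
      simp [bPairStep, dedupInto, hc, h, hadd, ih]

-- ===== VERDICT (by name: the statement is the Claim_ definition above) =====
theorem getatomroute_spec : Claim_equal_getatomroute := by
  intro item _hd _hp
  unfold Spec_getatomroute getatomroute getatomroute_alt
  simp only [A_loop, B_loop, B_pairs, List.nil_append]
  have hz : pairs (-1)
      (chs item.1.2.1 item.2.2.2.2 (-1) (PySem.List.pyRange 0 item.2.1 1)) =
      zpm (chs item.1.2.1 item.2.2.2.2 (-1) (PySem.List.pyRange 0 item.2.1 1)) :=
    pairs_neg _ (fun p hp => chs_pos _ _ _ _ p hp)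
  have hpr : ((chs item.1.2.1 item.2.2.2.2 (-1) (PySem.List.pyRange 0 item.2.1 1)).zip
        (chs item.1.2.1 item.2.2.2.2 (-1) (PySem.List.pyRange 0 item.2.1 1)).tail).foldl
        bPairStep (PySem.Set.empty, ([] : List (Int × Int))) =
      ((chs item.1.2.1 item.2.2.2.2 (-1) (PySem.List.pyRange 0 item.2.1 1)).zip
        (chs item.1.2.1 item.2.2.2.2 (-1) (PySem.List.pyRange 0 item.2.1 1)).tail).foldl
        bPairStep (([] : List (Int × Int)), ([] : List (Int × Int))) := rfl
  rw [hpr, B_pairs, ← zpm, hz]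
  rfl
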